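-- pv_equiv track=rewrite | github.com/honi/uba-aed3 | Prácticas/Práctica1/ej15/main.py | f
-- ===== SOURCE A (Python) =====
-- def insert_sorted(A, i, k):
--     j = len(A)
--     while i + 1 < j:
--         m = i + (j - i) // 2
--         if A[m] < k:
--             i = m
--         else:
--             j = m
--     return A[:i+1] + [k] + A[j:]
--
-- def f(A):
--     A.sort() # O(n log n)
--     r = 0
--     i = 0
--     while i < len(A) - 1:
--         k = A[i] + A[i + 1]
--         r += k
--         i += 1
--         # En C++ la lista estaría implementada como una lista doblemente enlazada
--         # para poder borrar e insertar elementos en cualquier posición en O(1).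
--         del A[i] # O(1)
--         A = insert_sorted(A, i, k) # O(log n) para encontrar la posición y O(1) para insertar k.
--     return r
-- ===== SOURCE B (Python) =====
-- def _take(A, sums, i, j):
--     # pop the smaller front of the two queues (original values / merge sums);
--     # on a tie the original-values queue is preferred
--     if j >= len(sums) or (i < len(A) and A[i] <= sums[j]):
--         return A[i], i + 1, j
--     return sums[j], i, j + 1
--
-- def f(A):
--     A.sort()
--     sums = []
--     i = 0
--     j = 0
--     r = 0
--     for _ in range(len(A) - 1):
--         x, i, j = _take(A, sums, i, j)
--         y, i, j = _take(A, sums, i, j)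
--         k = x + y
--         sums.append(k)
--         r += k
--     return r
-- ===== Notes on version B (the rewrite author's own statement) =====
-- stated objective: faster
-- what changed: Replaces the quadratic sort-then-repeatedly-delete-and-binary-insert list juggling with the classic two-queue optimal-merge scheme: sort once, then in one linear pass pop the smaller front of the sorted originals and a FIFO of merge sums.
import Mathlib
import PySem

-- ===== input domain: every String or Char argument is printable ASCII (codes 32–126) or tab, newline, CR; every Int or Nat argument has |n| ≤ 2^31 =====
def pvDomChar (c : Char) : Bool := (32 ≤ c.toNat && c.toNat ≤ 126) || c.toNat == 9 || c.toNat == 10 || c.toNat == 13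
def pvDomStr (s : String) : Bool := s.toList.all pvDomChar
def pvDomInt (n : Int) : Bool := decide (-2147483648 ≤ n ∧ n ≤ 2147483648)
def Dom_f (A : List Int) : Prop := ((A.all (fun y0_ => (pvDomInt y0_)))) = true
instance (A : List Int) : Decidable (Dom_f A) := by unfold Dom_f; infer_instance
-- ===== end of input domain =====

-- B replaces A's quadratic delete-and-binary-insert list juggling by the two-queue optimal-merge
-- scheme (sort once, then one linear pass over the sorted values and a FIFO of merge sums);
-- equivalence is about the RETURN value only (both sort the argument in place, but A additionally
-- deletes one element of the caller's list).

-- ===== PORT A =====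
-- the while-loop of insert_sorted: binary search over (i, j), returns the final (i, j)
def isearch (B : List Int) (k : Int) (i j : Nat) : Nat → Nat × Nat
  | 0 => (i, j)
  | fuel + 1 =>
    if i + 1 < j then
      if B.getD (i + (j - i) / 2) 0 < k then isearch B k (i + (j - i) / 2) j fuel
      else isearch B k i (i + (j - i) / 2) fuel
    else (i, j)

-- the fuel j - i strictly bounds the number of halving steps, so it never runs out
def insertSortedPy (B : List Int) (i : Nat) (k : Int) : List Int :=
  let p := isearch B k i B.length (B.length - i)
  B.take (p.1 + 1) ++ [k] ++ B.drop p.2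

def fLoop (A : List Int) (i : Nat) (r : Int) : Nat → Int
  | 0 => r
  | fuel + 1 =>
    if i + 1 < A.length then
      fLoop (insertSortedPy (A.eraseIdx (i + 1)) (i + 1) (A.getD i 0 + A.getD (i + 1) 0))
        (i + 1) (r + (A.getD i 0 + A.getD (i + 1) 0)) fuel
    else r

-- the fuel (the list's length) bounds the number of merge steps, so it never runs out
def f (A : List Int) : Int :=
  fLoop (PySem.List.sorted A (fun x => x) false) 0 0
    (PySem.List.sorted A (fun x => x) false).length

-- ===== PORT B =====
-- pop the smaller front of the two queues (sorted originals A from index i / merge sums from index j)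
def take2 (A sums : List Int) (i j : Nat) : Int × Nat × Nat :=
  if sums.length ≤ j ∨ (i < A.length ∧ A.getD i 0 ≤ sums.getD j 0) then (A.getD i 0, i + 1, j)
  else (sums.getD j 0, i, j + 1)

def bLoop (A sums : List Int) (i j : Nat) (r : Int) : Nat → Int
  | 0 => r
  | c + 1 =>
    let t1 := take2 A sums i j
    let t2 := take2 A sums t1.2.1 t1.2.2
    bLoop A (sums ++ [t1.1 + t2.1]) t2.2.1 t2.2.2 (r + (t1.1 + t2.1)) c

def f_alt (A : List Int) : Int :=
  let s := PySem.List.sorted A (fun x => x) false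
  bLoop s [] 0 0 0 (s.length - 1)

-- ===== PRECONDITION & SPEC =====
def Spec_f (A : List Int) (out : Int) : Prop := out = f_alt A
instance (A : List Int) (out : Int) : Decidable (Spec_f A out) := by unfold Spec_f; infer_instance

-- ===== CLAIM (what is proved, stated in full; the proofs are below) =====
def Claim_equal_f : Prop := ∀ (A : List Int), Dom_f A → Spec_f A (f A)

-- ===== LEMMAS AND PROOFS =====

def sortI (l : List Int) : List Int := PySem.List.sorted l (fun x => x) false

-- ordered insertion (lower bound: before the first element ≥ k)
def oi (k : Int) : List Int → List Int
  | [] => [k]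
  | x :: xs => if k ≤ x then k :: x :: xs else x :: oi k xs

theorem oi_length (k : Int) (l : List Int) : (oi k l).length = l.length + 1 := by
  induction l with
  | nil => rfl
  | cons x xs ih => simp only [oi]; split <;> simp [ih]

theorem oi_perm (k : Int) (l : List Int) : (oi k l).Perm (k :: l) := by
  induction l with
  | nil => simp [oi]
  | cons x xs ih =>
    simp only [oi]; split
    · exact List.Perm.refl _
    · exact (ih.cons x).trans (List.Perm.swap k x xs)

theorem oi_pairwise (k : Int) (l : List Int) (h : l.Pairwise (· ≤ ·)) :
    (oi k l).Pairwise (· ≤ ·) := by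
  induction l with
  | nil => simp [oi]
  | cons x xs ih =>
    rcases List.pairwise_cons.1 h with ⟨hx, hxs⟩
    simp only [oi]; split
    · next hk =>
      refine List.pairwise_cons.2 ⟨?_, h⟩
      intro y hy
      rcases hy with _ | hy
      · exact hk
      · exact le_trans hk (hx _ (by assumption))
    · next hk =>
      refine List.pairwise_cons.2 ⟨?_, ih hxs⟩
      intro y hy
      rcases List.mem_cons.1 ((oi_perm k xs).mem_iff.1 hy) with h1 | h2
      · subst h1; omega
      · exact hx _ h2

theorem grec_dec (k : Int) (t : List Int) : (oi k t).length < (k :: k :: t).length := by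
  simp [oi_length]

-- canonical recursion: repeatedly merge the two front (= smallest) elements of a sorted list
def grec : List Int → Int
  | [] => 0
  | [_] => 0
  | a :: b :: t => (a + b) + grec (oi (a + b) t)
termination_by l => l.length
decreasing_by exact grec_dec (a + b) t

theorem grec_short (l : List Int) (h : l.length ≤ 1) : grec l = 0 := by
  match l, h with
  | [], _ => simp [grec]
  | [_], _ => simp [grec]

theorem length_sortI (l : List Int) : (sortI l).length = l.length :=
  PySem.List.length_sorted ..

theorem sortI_perm (l : List Int) : (sortI l).Perm l := PySem.List.sorted_perm ..

-- the central step lemma, shared by both sides: if x and y are two minimal elements of the pool,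
-- popping them and re-inserting x+y advances grec∘sortI by exactly x+y
theorem grec_key (x y : Int) (R L L' : List Int)
    (hL : L.Perm (x :: y :: R)) (hL' : L'.Perm ((x + y) :: R))
    (hx : ∀ z ∈ R, x ≤ z) (hy : ∀ z ∈ R, y ≤ z) :
    grec (sortI L) = (x + y) + grec (sortI L') := by
  have hRpw : (sortI R).Pairwise (· ≤ ·) := by
    unfold sortI
    simpa using PySem.List.sorted_pairwise R (fun x : Int => x)
  have hmem : ∀ z ∈ sortI R, z ∈ R := fun z hz => (sortI_perm R).mem_iff.1 hz
  have h2 : sortI L' = oi (x + y) (sortI R) := by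
    unfold sortI
    refine PySem.List.sorted_id_eq_of_perm_of_pairwise _ _ ?_ ?_
    · exact ((oi_perm _ _).trans (((sortI_perm R).cons _))).trans hL'.symm
    · exact oi_pairwise _ _ hRpw
  rcases le_total x y with hxy | hxy
  · have h1 : sortI L = x :: y :: sortI R := by
      unfold sortI
      refine PySem.List.sorted_id_eq_of_perm_of_pairwise _ _ ?_ ?_
      · exact ((((sortI_perm R).cons y).cons x)).trans hL.symm
      · refine List.pairwise_cons.2 ⟨?_, List.pairwise_cons.2 ⟨?_, hRpw⟩⟩
        · intro z hz
          rcases List.mem_cons.1 hz with h | h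
          · omega
          · exact hx _ (hmem _ h)
        · intro z hz; exact hy _ (hmem _ hz)
    rw [h1, h2]; simp [grec]
  · have h1 : sortI L = y :: x :: sortI R := by
      unfold sortI
      refine PySem.List.sorted_id_eq_of_perm_of_pairwise _ _ ?_ ?_
      · exact ((((sortI_perm R).cons x).cons y)).trans ((List.Perm.swap x y R).trans hL.symm)
      · refine List.pairwise_cons.2 ⟨?_, List.pairwise_cons.2 ⟨?_, hRpw⟩⟩
        · intro z hz
          rcases List.mem_cons.1 hz with h | h
          · omega
          · exact hy _ (hmem _ h)
        · intro z hz; exact hx _ (hmem _ hz)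
    rw [h1, h2]; simp [grec]
    have h3 : y + x = x + y := by ring
    rw [h3]

-- getD through drop
theorem getD_drop (A : List Int) (i n : Nat) : (A.drop i).getD n 0 = A.getD (i + n) 0 := by
  simp [List.getD_eq_getElem?_getD, List.getElem?_drop]

-- ===== A-side =====

-- isearch ends with i+1 = j inside the interval; insert_sorted always lengthens the list by one
theorem isearch_post (B : List Int) (k : Int) : ∀ (fuel i j : Nat), j - i ≤ fuel →
    (i < j → i ≤ (isearch B k i j fuel).1 ∧ (isearch B k i j fuel).1 + 1 = (isearch B k i j fuel).2 ∧
      (isearch B k i j fuel).2 ≤ j)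
    ∧ (¬ i < j → isearch B k i j fuel = (i, j)) := by
  intro fuel
  induction fuel with
  | zero =>
    intro i j hf
    exact ⟨by intro h; exfalso; omega, by intro _; rfl⟩
  | succ fuel ih =>
    intro i j hf
    show (i < j → i ≤ (isearch B k i j (fuel + 1)).1 ∧ _ ∧ _) ∧ _
    rw [isearch]
    split
    · next h =>
      constructor
      · intro _
        split
        · have := (ih (i + (j - i) / 2) j (by omega)).1 (by omega)
          omega
        · have := (ih i (i + (j - i) / 2) (by omega)).1 (by omega)
          omega
      · intro hc; omega
    · next h =>
      exact ⟨by intro hij; simp; omega, by intro _; rfl⟩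

theorem insertSortedPy_length (B : List Int) (i : Nat) (k : Int) :
    (insertSortedPy B i k).length = B.length + 1 := by
  unfold insertSortedPy
  rcases Nat.lt_or_ge i B.length with h | h
  · have hp := (isearch_post B k (B.length - i) i B.length (by omega)).1 h
    simp [List.length_take]
    omega
  · have hp := (isearch_post B k (B.length - i) i B.length (by omega)).2 (by omega)
    simp [hp, List.length_take]
    omega


-- characterisation of insert_sorted: with the region beyond i+1 sorted, it is ordered insertion
-- of k into B.drop (i+1), the prefix B.take (i+1) kept as is
theorem isearch_run (B : List Int) (k : Int) (i0 : Nat)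
    (hsort : ∀ m1 m2, i0 < m1 → m1 ≤ m2 → m2 < B.length → B.getD m1 0 ≤ B.getD m2 0) :
    ∀ (fuel i j : Nat), j - i ≤ fuel → i0 ≤ i → i < j → j ≤ B.length →
    (∀ m, i0 < m → m ≤ i → B.getD m 0 < k) →
    (∀ m, j ≤ m → m < B.length → ¬ B.getD m 0 < k) →
    i0 < (isearch B k i j fuel).2 ∧ (isearch B k i j fuel).2 ≤ B.length ∧
    (∀ m, i0 < m → m < (isearch B k i j fuel).2 → B.getD m 0 < k) ∧
    (∀ m, (isearch B k i j fuel).2 ≤ m → m < B.length → ¬ B.getD m 0 < k) := by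
  intro fuel
  induction fuel with
  | zero =>
    intro i j hf hi0 hij hjlen hlt hge
    exfalso; omega
  | succ fuel ih =>
    intro i j hf hi0 hij hjlen hlt hge
    rw [isearch]
    split
    · next h =>
      split
      · next hmk =>
        refine ih _ _ (by omega) (by omega) (by omega) hjlen ?_ hge
        intro m' h1 h2
        rcases Nat.lt_or_ge i m' with h3 | h3
        · have := hsort m' (i + (j - i) / 2) h1 h2 (by omega)
          omega
        · exact hlt m' h1 (by omega)
      · next hmk =>
        refine ih _ _ (by omega) hi0 (by omega) (by omega) hlt ?_
        intro m' h1 h2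
        have := hsort (i + (j - i) / 2) m' (by omega) h1 h2
        omega
    · next h =>
      refine ⟨by omega, by simpa using hjlen, ?_, ?_⟩
      · intro m h1 h2
        simp only at h2
        exact hlt m h1 (by omega)
      · intro m h1 h2
        simp only at h1
        exact hge m h1 h2

theorem oi_take_drop (k : Int) (t : List Int) : ∀ d : Nat, d ≤ t.length →
    (∀ idx : Nat, idx < d → t.getD idx 0 < k) →
    (∀ idx : Nat, d ≤ idx → idx < t.length → ¬ t.getD idx 0 < k) →
    t.take d ++ k :: t.drop d = oi k t := by
  induction t with
  | nil =>
    intro d hd _ _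
    have hd0 : d = 0 := by simpa using hd
    subst hd0
    simp [oi]
  | cons x xs ih =>
    intro d hd hlt hge
    match d with
    | 0 =>
      have h0 := hge 0 (by omega) (by simp)
      simp only [List.getD_cons_zero] at h0
      simp [oi, show k ≤ x by omega]
    | Nat.succ d' =>
      have h0 := hlt 0 (by omega)
      simp only [List.getD_cons_zero] at h0
      have hrec := ih d' (by simpa using hd)
        (fun idx hidx => by simpa using hlt (idx + 1) (by omega))
        (fun idx h1 h2 => by simpa using hge (idx + 1) (by omega) (by simpa using h2))
      simp [oi, show ¬ k ≤ x by omega, List.take_succ_cons, List.drop_succ_cons, hrec]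

theorem insertSortedPy_char (B : List Int) (i0 : Nat) (k : Int)
    (hs : (B.drop (i0 + 1)).Pairwise (· ≤ ·)) :
    insertSortedPy B i0 k = B.take (i0 + 1) ++ oi k (B.drop (i0 + 1)) := by
  have hmono : ∀ a b : Nat, a ≤ b → b < (B.drop (i0 + 1)).length →
      (B.drop (i0 + 1)).getD a 0 ≤ (B.drop (i0 + 1)).getD b 0 := by
    intro a b hab hb
    rcases Nat.eq_or_lt_of_le hab with h | h
    · rw [h]
    · rw [List.getD_eq_getElem _ _ (by omega), List.getD_eq_getElem _ _ hb]
      exact List.pairwise_iff_getElem.1 hs a b (by omega) hb h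
  rcases Nat.lt_or_ge i0 B.length with hlen | hlen
  · have hsortg : ∀ m1 m2 : Nat, i0 < m1 → m1 ≤ m2 → m2 < B.length →
        B.getD m1 0 ≤ B.getD m2 0 := by
      intro m1 m2 h1 h2 h3
      have e1 : m1 = (i0 + 1) + (m1 - (i0 + 1)) := by omega
      have e2 : m2 = (i0 + 1) + (m2 - (i0 + 1)) := by omega
      rw [e1, e2, ← getD_drop, ← getD_drop]
      exact hmono _ _ (by omega) (by simp; omega)
    have hrun := isearch_run B k i0 hsortg (B.length - i0) i0 B.length (by omega) (le_refl _)
      hlen (le_refl _) (by intro m h1 h2; omega) (by intro m h1 h2; omega)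
    have hpost := (isearch_post B k (B.length - i0) i0 B.length (by omega)).1 hlen
    unfold insertSortedPy
    show B.take ((isearch B k i0 B.length (B.length - i0)).1 + 1) ++ [k] ++
        B.drop (isearch B k i0 B.length (B.length - i0)).2 =
      B.take (i0 + 1) ++ oi k (B.drop (i0 + 1))
    obtain ⟨hp1, hp2, hreg1, hreg2⟩ := hrun
    set p := (isearch B k i0 B.length (B.length - i0)).2 with hp
    have hTD := oi_take_drop k (B.drop (i0 + 1)) (p - (i0 + 1)) (by simp; omega)
      (by
        intro idx hidx
        rw [getD_drop]
        exact hreg1 _ (by omega) (by omega))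
      (by
        intro idx h1 h2
        rw [getD_drop]
        exact hreg2 _ (by omega) (by simp at h2; omega))
    rw [← hTD]
    have htake : B.take ((isearch B k i0 B.length (B.length - i0)).1 + 1) =
        B.take (i0 + 1) ++ (B.drop (i0 + 1)).take (p - (i0 + 1)) := by
      rw [← List.take_add]
      congr 1
      omega
    have hdrop : B.drop p = (B.drop (i0 + 1)).drop (p - (i0 + 1)) := by
      rw [List.drop_drop]
      congr 1
      omega
    rw [htake, hdrop]
    simp
  · have hpost := (isearch_post B k (B.length - i0) i0 B.length (by omega)).2 (by omega)
    unfold insertSortedPy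
    show B.take ((isearch B k i0 B.length (B.length - i0)).1 + 1) ++ [k] ++
        B.drop (isearch B k i0 B.length (B.length - i0)).2 =
      B.take (i0 + 1) ++ oi k (B.drop (i0 + 1))
    rw [hpost]
    simp [List.take_of_length_le (by omega : B.length ≤ i0 + 1),
      List.drop_of_length_le (by omega : B.length ≤ i0 + 1), oi]

-- invariant of A's loop, on the active suffix: the first two elements are two minimal ones,
-- and the rest is sorted
def IA : List Int → Prop
  | a :: b :: t => t.Pairwise (· ≤ ·) ∧ (∀ z ∈ t, a ≤ z) ∧ (∀ z ∈ t, b ≤ z)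
  | _ => True

theorem fLoop_eq (n : Nat) : ∀ (A : List Int) (i : Nat) (r : Int),
    A.length - i ≤ n → i ≤ A.length → IA (A.drop i) →
    fLoop A i r n = r + grec (sortI (A.drop i)) := by
  induction n with
  | zero =>
    intro A i r hn hi _
    rw [show fLoop A i r 0 = r from rfl]
    rw [grec_short _ (by rw [length_sortI]; simp; omega)]
    ring
  | succ n ih =>
    intro A i r hn hi hIA
    by_cases hcond : i + 1 < A.length
    · rw [fLoop, if_pos hcond]
      rcases hM : A.drop i with _ | ⟨m0, M1⟩
      · exfalso; have := congrArg List.length hM; simp at this; omega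
      rcases M1 with _ | ⟨m1, rest⟩
      · exfalso; have := congrArg List.length hM; simp at this; omega
      have hm0 : A.getD i 0 = m0 := by
        have h := getD_drop A i 0; rw [hM] at h; simpa using h.symm
      have hm1 : A.getD (i + 1) 0 = m1 := by
        have h := getD_drop A i 1; rw [hM] at h; simpa using h.symm
      have hrest : A.drop (i + 2) = rest := by
        have h : (A.drop i).drop 2 = A.drop (i + 2) := List.drop_drop
        rw [hM] at h; simpa using h.symm
      rw [hM] at hIA
      simp only [IA] at hIA
      obtain ⟨hrpw, hm0le, hm1le⟩ := hIA
      set k := A.getD i 0 + A.getD (i + 1) 0 with hk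
      have hkval : k = m0 + m1 := by rw [hk, hm0, hm1]
      set A2 := A.eraseIdx (i + 1) with hA2def
      have hA2 : A2 = A.take (i + 1) ++ A.drop (i + 2) := List.eraseIdx_eq_take_drop_succ ..
      have htklen : (A.take (i + 1)).length = i + 1 := by simp; omega
      have hA2len : A2.length = A.length - 1 := by
        rw [hA2]; simp [htklen]; omega
      have hA2d2 : A2.drop (i + 2) = rest.drop 1 := by
        rw [hA2, List.drop_append]
        rw [List.drop_of_length_le (by omega : (A.take (i+1)).length ≤ i + 2), htklen]
        simp [hrest]
      have hA2pw : (A2.drop (i + 1 + 1)).Pairwise (· ≤ ·) := by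
        rw [show i + 1 + 1 = i + 2 from rfl, hA2d2]
        exact List.Pairwise.sublist (List.drop_sublist _ _) hrpw
      have hchar := insertSortedPy_char A2 (i + 1) k hA2pw
      have hA3len : (insertSortedPy A2 (i + 1) k).length = A.length := by
        rw [insertSortedPy_length, hA2len]; omega
      have hA3drop : (insertSortedPy A2 (i + 1) k).drop (i + 1) =
          rest.take 1 ++ oi k (rest.drop 1) := by
        rw [hchar, List.drop_append]
        have h1 : (A2.take (i + 1 + 1)).drop (i + 1) = (A2.drop (i + 1)).take 1 := by
          rw [List.drop_take]
          congr 1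
          omega
        have h2 : A2.drop (i + 1) = rest := by
          rw [hA2, List.drop_append, List.drop_of_length_le (le_of_eq htklen), htklen]
          simp [hrest]
        have h3 : (A2.take (i + 1 + 1)).length = min (i + 2) A2.length := by simp
        rw [h1, h2, hA2d2, show i + 1 + 1 = i + 2 from rfl, h3]
        have h4 : i + 1 - min (i + 2) A2.length = 0 := by omega
        rw [h4]
        simp
      have hIAnew : IA ((insertSortedPy A2 (i + 1) k).drop (i + 1)) := by
        rw [hA3drop]
        rcases rest with _ | ⟨r0, rt⟩
        · simp [oi, IA]
        rcases List.pairwise_cons.1 hrpw with ⟨hr0le, hrtpw⟩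
        rcases rt with _ | ⟨x, xs⟩
        · simp [oi, IA]
        rcases List.pairwise_cons.1 hrtpw with ⟨hxle, hxspw⟩
        simp only [List.take_cons, List.take_zero, List.drop_succ_cons, List.drop_zero,
          List.cons_append, List.nil_append, oi]
        split
        · next hkx =>
          simp only [IA]
          refine ⟨hrtpw, ?_, ?_⟩
          · intro z hz; exact hr0le z hz
          · intro z hz
            rcases List.mem_cons.1 hz with h | h
            · omega
            · have := hxle z h; omega
        · next hkx =>
          simp only [IA]
          refine ⟨oi_pairwise _ _ hxspw, ?_, ?_⟩
          · intro z hz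
            rcases List.mem_cons.1 ((oi_perm k xs).mem_iff.1 hz) with h | h
            · have := hr0le x (by simp); omega
            · exact hr0le z (by simp [h])
          · intro z hz
            rcases List.mem_cons.1 ((oi_perm k xs).mem_iff.1 hz) with h | h
            · omega
            · exact hxle z h
      have hrec := ih (insertSortedPy A2 (i + 1) k) (i + 1) (r + k) (by omega) (by omega) hIAnew
      rw [hrec, hA3drop]
      have hperm : (rest.take 1 ++ oi k (rest.drop 1)).Perm ((m0 + m1) :: rest) := by
        rcases rest with _ | ⟨r0, rt⟩
        · simp [oi, hkval]
        · simp only [List.take_cons, List.take_zero, List.drop_succ_cons, List.drop_zero,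
            List.cons_append, List.nil_append]
          rw [← hkval]
          exact ((oi_perm k rt).cons r0).trans (List.Perm.swap k r0 rt)
      have hkey := grec_key m0 m1 rest (m0 :: m1 :: rest) (rest.take 1 ++ oi k (rest.drop 1))
        (List.Perm.refl _) hperm hm0le hm1le
      rw [hkey, hkval]
      ring
    · rw [fLoop, if_neg hcond]
      rw [grec_short _ (by rw [length_sortI]; simp; omega)]
      ring

-- ===== B-side =====

-- invariant of B's queues: both sorted, and every queued sum is at most twice anything that
-- was still in the pool when it was formed
def InvB (S Q : List Int) : Prop :=
  S.Pairwise (· ≤ ·) ∧ Q.Pairwise (· ≤ ·) ∧ (∀ s ∈ S, ∀ q ∈ Q, q ≤ 2 * s) ∧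
    Q.Pairwise (fun a b => b ≤ 2 * a)


theorem drop_append_right (sums : List Int) (k : Int) (j : Nat) (hj : j ≤ sums.length) :
    (sums ++ [k]).drop j = sums.drop j ++ [k] := by
  rw [List.drop_append, show j - sums.length = 0 by omega]
  simp

theorem bLoop_step (A sums : List Int) (i j : Nat) (r : Int) (c : Nat) :
    bLoop A sums i j r (c + 1) =
      bLoop A (sums ++ [(take2 A sums i j).1 +
          (take2 A sums (take2 A sums i j).2.1 (take2 A sums i j).2.2).1])
        (take2 A sums (take2 A sums i j).2.1 (take2 A sums i j).2.2).2.1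
        (take2 A sums (take2 A sums i j).2.1 (take2 A sums i j).2.2).2.2
        (r + ((take2 A sums i j).1 +
          (take2 A sums (take2 A sums i j).2.1 (take2 A sums i j).2.2).1)) c := rfl

theorem bLoop_eq : ∀ (c : Nat) (A sums : List Int) (i j : Nat) (r : Int),
    i ≤ A.length → j ≤ sums.length →
    c + 1 = (A.length - i) + (sums.length - j) →
    InvB (A.drop i) (sums.drop j) →
    bLoop A sums i j r c = r + grec (sortI (A.drop i ++ sums.drop j)) := by
  intro c
  induction c with
  | zero =>
    intro A sums i j r hi hj hcount _
    have h1 : (A.drop i ++ sums.drop j).length ≤ 1 := by simp; omega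
    rw [show bLoop A sums i j r 0 = r from rfl,
      grec_short _ (by rw [length_sortI]; exact h1)]
    ring
  | succ c ih =>
    intro A sums i j r hi hj hcount hInv
    obtain ⟨hSpw, hQpw, hSQ, hQ2⟩ := hInv
    rw [bLoop_step]
    by_cases h1 : sums.length ≤ j ∨ (i < A.length ∧ A.getD i 0 ≤ sums.getD j 0)
    · have ht1 : take2 A sums i j = (A.getD i 0, i + 1, j) := by rw [take2, if_pos h1]
      have hSne : i < A.length := by
        rcases h1 with h | h
        · omega
        · exact h.1
      rcases hS : A.drop i with _ | ⟨s0, S1⟩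
      · exfalso; have := congrArg List.length hS; simp at this; omega
      rw [hS] at hSpw hSQ
      have hx : A.getD i 0 = s0 := by
        have h := getD_drop A i 0; rw [hS] at h; simpa using h.symm
      have hS1 : A.drop (i + 1) = S1 := by
        have h : (A.drop i).drop 1 = A.drop (i + 1) := List.drop_drop
        rw [hS] at h; simpa using h.symm
      have hs0S1 : ∀ z ∈ S1, s0 ≤ z := (List.pairwise_cons.1 hSpw).1
      have hs0Q : ∀ q ∈ sums.drop j, s0 ≤ q := by
        rcases h1 with h | h
        · rw [List.drop_of_length_le h]; simp
        · rcases hQd : sums.drop j with _ | ⟨q0, Q1⟩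
          · simp
          · have hq0 : sums.getD j 0 = q0 := by
              have hh := getD_drop sums j 0; rw [hQd] at hh; simpa using hh.symm
            rw [hQd] at hQpw
            intro q hq
            rcases List.mem_cons.1 hq with hh | hh
            · rw [hx, hq0] at h; omega
            · have := (List.pairwise_cons.1 hQpw).1 q hh
              rw [hx, hq0] at h; omega
      by_cases h2 : sums.length ≤ j ∨ (i + 1 < A.length ∧ A.getD (i + 1) 0 ≤ sums.getD j 0)
      · -- case SS: both pops from the sorted originals
        have ht2 : take2 A sums (i + 1) j = (A.getD (i + 1) 0, i + 1 + 1, j) := by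
          rw [take2, if_pos h2]
        have hS2ne : i + 1 < A.length := by
          rcases h2 with h | h
          · omega
          · exact h.1
        rcases hS1c : S1 with _ | ⟨s1, S2⟩
        · exfalso
          have := congrArg List.length hS
          rw [hS1c] at this; simp at this; omega
        rw [hS1c] at hSpw hSQ hs0S1 hS1
        have hy : A.getD (i + 1) 0 = s1 := by
          have h := getD_drop A i 1; rw [hS] at h
          rw [hS1c] at h; simpa using h.symm
        have hS2 : A.drop (i + 2) = S2 := by
          have h : (A.drop i).drop 2 = A.drop (i + 2) := List.drop_drop
          rw [hS, hS1c] at h; simpa using h.symm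
        have hs01 : s0 ≤ s1 := (List.pairwise_cons.1 hSpw).1 s1 (by simp)
        have hs1S2 : ∀ z ∈ S2, s1 ≤ z :=
          (List.pairwise_cons.1 (List.pairwise_cons.1 hSpw).2).1
        have hs0S2 : ∀ z ∈ S2, s0 ≤ z := fun z hz => hs0S1 z (by simp [hz])
        have hs1Q : ∀ q ∈ sums.drop j, s1 ≤ q := by
          rcases h2 with h | h
          · rw [List.drop_of_length_le h]; simp
          · rcases hQd : sums.drop j with _ | ⟨q0, Q1⟩
            · simp
            · have hq0 : sums.getD j 0 = q0 := by
                have hh := getD_drop sums j 0; rw [hQd] at hh; simpa using hh.symm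
              rw [hQd] at hQpw
              intro q hq
              rcases List.mem_cons.1 hq with hh | hh
              · rw [hy, hq0] at h; omega
              · have := (List.pairwise_cons.1 hQpw).1 q hh
                rw [hy, hq0] at h; omega
        have hkQ : ∀ q ∈ sums.drop j, q ≤ s0 + s1 := by
          intro q hq
          have := hSQ s0 (by simp) q hq
          omega
        have hQK : (sums ++ [s0 + s1]).drop j = sums.drop j ++ [s0 + s1] :=
          drop_append_right sums (s0 + s1) j hj
        have hInv' : InvB (A.drop (i + 2)) ((sums ++ [s0 + s1]).drop j) := by
          rw [hS2, hQK]
          refine ⟨(List.pairwise_cons.1 (List.pairwise_cons.1 hSpw).2).2, ?_, ?_, ?_⟩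
          · rw [List.pairwise_append]
            refine ⟨hQpw, by simp, ?_⟩
            intro a ha b hb
            rcases List.mem_singleton.1 hb with rfl
            exact hkQ a ha
          · intro s hs q hq
            rcases List.mem_append.1 hq with hh | hh
            · exact hSQ s (by simp [hs]) q hh
            · rcases List.mem_singleton.1 hh with rfl
              have h1' := hs0S2 s hs
              have h2' := hs1S2 s hs
              omega
          · rw [List.pairwise_append]
            refine ⟨hQ2, by simp, ?_⟩
            intro a ha b hb
            rcases List.mem_singleton.1 hb with rfl
            have h1' := hs0Q a ha
            have h2' := hs1Q a ha
            omega
        have hlenS := congrArg List.length hS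
        simp [List.length_drop] at hlenS
        have hrec := ih A (sums ++ [s0 + s1]) (i + 2) j (r + (s0 + s1)) (by omega)
          (by simp; omega) (by simp; omega) hInv'
        rw [hS2, hQK] at hrec
        simp only [ht1]
        simp only [ht2]
        rw [hx, hy, show i + 1 + 1 = i + 2 from rfl, hrec]
        have hkey := grec_key s0 s1 (S2 ++ sums.drop j) ((s0 :: s1 :: S2) ++ sums.drop j)
          (S2 ++ (sums.drop j ++ [s0 + s1])) (List.Perm.refl _)
          (by rw [← List.append_assoc]; exact List.perm_append_singleton _ _)
          (by
            intro z hz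
            rcases List.mem_append.1 hz with h | h
            · exact hs0S2 z h
            · exact hs0Q z h)
          (by
            intro z hz
            rcases List.mem_append.1 hz with h | h
            · exact hs1S2 z h
            · exact hs1Q z h)
        rw [hkey]
        ring
      · -- case SQ: one pop from the originals, one from the sums queue
        push_neg at h2
        obtain ⟨hjlt, h2b⟩ := h2
        rcases hQd : sums.drop j with _ | ⟨q0, Q1⟩
        · exfalso; have := congrArg List.length hQd; simp at this; omega
        rw [hQd] at hQpw hSQ hQ2 hs0Q
        have hq0 : sums.getD j 0 = q0 := by
          have hh := getD_drop sums j 0; rw [hQd] at hh; simpa using hh.symm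
        have ht2 : take2 A sums (i + 1) j = (sums.getD j 0, i + 1, j + 1) := by
          rw [take2, if_neg]
          push_neg
          exact ⟨by omega, h2b⟩
        have hs0q0 : s0 ≤ q0 := hs0Q q0 (by simp)
        have hq0Q1 : ∀ q ∈ Q1, q0 ≤ q := (List.pairwise_cons.1 hQpw).1
        have hq0S1 : ∀ z ∈ S1, q0 ≤ z := by
          intro z hz
          rcases Nat.lt_or_ge (i + 1) A.length with hlt | hge
          · rcases hS1c : S1 with _ | ⟨s1, S2⟩
            · rw [hS1c] at hz; simp at hz
            · have hy1 : A.getD (i + 1) 0 = s1 := by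
                have h := getD_drop A i 1; rw [hS, hS1c] at h; simpa using h.symm
              have hlt2 := h2b hlt
              rw [hy1, hq0] at hlt2
              rw [hS1c] at hz hSpw
              rcases List.mem_cons.1 hz with hh | hh
              · omega
              · have := (List.pairwise_cons.1 (List.pairwise_cons.1 hSpw).2).1 z hh
                omega
          · rw [← hS1, List.drop_of_length_le hge] at hz
            simp at hz
        have hkQ1 : ∀ q ∈ Q1, q ≤ s0 + q0 := by
          intro q hq
          have ha := hSQ s0 (by simp) q (by simp [hq])
          have hb := (List.pairwise_cons.1 hQ2).1 q hq
          omega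
        have hQ1K : (sums ++ [s0 + q0]).drop (j + 1) = Q1 ++ [s0 + q0] := by
          rw [drop_append_right sums (s0 + q0) (j + 1) (by omega)]
          have h : (sums.drop j).drop 1 = sums.drop (j + 1) := List.drop_drop
          rw [hQd] at h; simp at h
          rw [← h]
        have hInv' : InvB (A.drop (i + 1)) ((sums ++ [s0 + q0]).drop (j + 1)) := by
          rw [hS1, hQ1K]
          refine ⟨(List.pairwise_cons.1 hSpw).2, ?_, ?_, ?_⟩
          · rw [List.pairwise_append]
            refine ⟨(List.pairwise_cons.1 hQpw).2, by simp, ?_⟩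
            intro a ha b hb
            rcases List.mem_singleton.1 hb with rfl
            exact hkQ1 a ha
          · intro s hs q hq
            rcases List.mem_append.1 hq with hh | hh
            · exact hSQ s (by simp [hs]) q (by simp [hh])
            · rcases List.mem_singleton.1 hh with rfl
              have h1' := hs0S1 s hs
              have h2' := hq0S1 s hs
              omega
          · rw [List.pairwise_append]
            refine ⟨(List.pairwise_cons.1 hQ2).2, by simp, ?_⟩
            intro a ha b hb
            rcases List.mem_singleton.1 hb with rfl
            have h1' := hs0Q a (by simp [ha])
            have h2' := hq0Q1 a ha
            omega
        have hlenS := congrArg List.length hS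
        simp [List.length_drop] at hlenS
        have hlenQ := congrArg List.length hQd
        simp [List.length_drop] at hlenQ
        have hrec := ih A (sums ++ [s0 + q0]) (i + 1) (j + 1) (r + (s0 + q0)) (by omega)
          (by simp; omega) (by simp; omega) hInv'
        rw [hS1, hQ1K] at hrec
        simp only [ht1]
        simp only [ht2]
        rw [hx, hq0, hrec]
        have hkey := grec_key s0 q0 (S1 ++ Q1) ((s0 :: S1) ++ (q0 :: Q1))
          (S1 ++ (Q1 ++ [s0 + q0]))
          (by
            rw [List.cons_append]
            exact (List.perm_middle.cons s0).trans (List.Perm.refl _))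
          (by rw [← List.append_assoc]; exact List.perm_append_singleton _ _)
          (by
            intro z hz
            rcases List.mem_append.1 hz with h | h
            · exact hs0S1 z h
            · exact hs0Q z (by simp [h]))
          (by
            intro z hz
            rcases List.mem_append.1 hz with h | h
            · exact hq0S1 z h
            · exact hq0Q1 z h)
        rw [hkey]
        ring
    · -- first pop comes from the sums queue
      push_neg at h1
      obtain ⟨hjlt, h1b⟩ := h1
      have ht1 : take2 A sums i j = (sums.getD j 0, i, j + 1) := by
        rw [take2, if_neg]
        push_neg
        exact ⟨by omega, h1b⟩
      rcases hQd : sums.drop j with _ | ⟨q0, Q1⟩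
      · exfalso; have := congrArg List.length hQd; simp at this; omega
      rw [hQd] at hQpw hSQ hQ2
      have hq0 : sums.getD j 0 = q0 := by
        have hh := getD_drop sums j 0; rw [hQd] at hh; simpa using hh.symm
      have hq0Q1 : ∀ q ∈ Q1, q0 ≤ q := (List.pairwise_cons.1 hQpw).1
      have hq0S : ∀ z ∈ A.drop i, q0 ≤ z := by
        intro z hz
        rcases Nat.lt_or_ge i A.length with hlt | hge
        · rcases hSd : A.drop i with _ | ⟨s0, S1⟩
          · rw [hSd] at hz; simp at hz
          · have hx0 : A.getD i 0 = s0 := by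
              have h := getD_drop A i 0; rw [hSd] at h; simpa using h.symm
            have hlt2 := h1b hlt
            rw [hx0, hq0] at hlt2
            rw [hSd] at hz
            have hSpw' := hSpw
            rw [hSd] at hSpw'
            rcases List.mem_cons.1 hz with hh | hh
            · omega
            · have := (List.pairwise_cons.1 hSpw').1 z hh
              omega
        · rw [List.drop_of_length_le hge] at hz; simp at hz
      have hlenQ := congrArg List.length hQd
      simp [List.length_drop] at hlenQ
      by_cases h2 : sums.length ≤ j + 1 ∨ (i < A.length ∧ A.getD i 0 ≤ sums.getD (j + 1) 0)
      · -- case QS: second pop from the originals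
        have ht2 : take2 A sums i (j + 1) = (A.getD i 0, i + 1, j + 1) := by
          rw [take2, if_pos h2]
        have hSne : i < A.length := by
          rcases h2 with h | h
          · omega
          · exact h.1
        rcases hSd : A.drop i with _ | ⟨s0, S1⟩
        · exfalso; have := congrArg List.length hSd; simp at this; omega
        rw [hSd] at hSpw hSQ hq0S
        have hx : A.getD i 0 = s0 := by
          have h := getD_drop A i 0; rw [hSd] at h; simpa using h.symm
        have hS1 : A.drop (i + 1) = S1 := by
          have h : (A.drop i).drop 1 = A.drop (i + 1) := List.drop_drop
          rw [hSd] at h; simpa using h.symm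
        have hs0S1 : ∀ z ∈ S1, s0 ≤ z := (List.pairwise_cons.1 hSpw).1
        have hq0s0 : q0 ≤ s0 := hq0S s0 (by simp)
        have hs0Q1 : ∀ q ∈ Q1, s0 ≤ q := by
          rcases h2 with h | h
          · intro q hq
            exfalso
            have hdq : sums.drop (j + 1) = Q1 := by
              have hdd : (sums.drop j).drop 1 = sums.drop (j + 1) := List.drop_drop
              rw [hQd] at hdd; simpa using hdd.symm
            have h' : Q1.length = 0 := by
              rw [← hdq]; simp; omega
            rw [List.length_eq_zero_iff.1 h'] at hq
            simp at hq
          · intro q hq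
            have hq1v : sums.getD (j + 1) 0 = Q1.getD 0 0 := by
              have hdd : (sums.drop j).drop 1 = sums.drop (j + 1) := List.drop_drop
              rw [hQd] at hdd
              have h' := getD_drop sums (j + 1) 0
              rw [← hdd] at h'
              simpa using h'.symm
            rcases hQ1d : Q1 with _ | ⟨q1, Q2⟩
            · rw [hQ1d] at hq; simp at hq
            · rw [hQ1d] at hq
              have hq1 : sums.getD (j + 1) 0 = q1 := by rw [hq1v, hQ1d]; simp
              rw [hx, hq1] at h
              rcases List.mem_cons.1 hq with hh | hh
              · omega
              · have hQpw' := hQpw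
                rw [hQ1d] at hQpw'
                have := (List.pairwise_cons.1 (List.pairwise_cons.1 hQpw').2).1 q hh
                omega
        have hkQ1 : ∀ q ∈ Q1, q ≤ q0 + s0 := by
          intro q hq
          have ha := hSQ s0 (by simp) q (by simp [hq])
          have hb := (List.pairwise_cons.1 hQ2).1 q hq
          omega
        have hQ1K : (sums ++ [q0 + s0]).drop (j + 1) = Q1 ++ [q0 + s0] := by
          rw [drop_append_right sums (q0 + s0) (j + 1) (by omega)]
          have h : (sums.drop j).drop 1 = sums.drop (j + 1) := List.drop_drop
          rw [hQd] at h; simp at h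
          rw [← h]
        have hInv' : InvB (A.drop (i + 1)) ((sums ++ [q0 + s0]).drop (j + 1)) := by
          rw [hS1, hQ1K]
          refine ⟨(List.pairwise_cons.1 hSpw).2, ?_, ?_, ?_⟩
          · rw [List.pairwise_append]
            refine ⟨(List.pairwise_cons.1 hQpw).2, by simp, ?_⟩
            intro a ha b hb
            rcases List.mem_singleton.1 hb with rfl
            exact hkQ1 a ha
          · intro s hs q hq
            rcases List.mem_append.1 hq with hh | hh
            · exact hSQ s (by simp [hs]) q (by simp [hh])
            · rcases List.mem_singleton.1 hh with rfl
              have h1' := hs0S1 s hs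
              have h2' := hq0S s (by simp [hs])
              omega
          · rw [List.pairwise_append]
            refine ⟨(List.pairwise_cons.1 hQ2).2, by simp, ?_⟩
            intro a ha b hb
            rcases List.mem_singleton.1 hb with rfl
            have h1' := hq0Q1 a ha
            have h2' := hs0Q1 a ha
            omega
        have hlenS := congrArg List.length hSd
        simp [List.length_drop] at hlenS
        have hrec := ih A (sums ++ [q0 + s0]) (i + 1) (j + 1) (r + (q0 + s0)) (by omega)
          (by simp; omega) (by simp; omega) hInv'
        rw [hS1, hQ1K] at hrec
        simp only [ht1]
        simp only [ht2]
        rw [hx, hq0, hrec]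
        have hkey := grec_key q0 s0 (S1 ++ Q1) ((s0 :: S1) ++ (q0 :: Q1))
          (S1 ++ (Q1 ++ [q0 + s0]))
          (by
            rw [List.cons_append]
            exact (List.perm_middle.cons s0).trans (List.Perm.swap q0 s0 (S1 ++ Q1)))
          (by rw [← List.append_assoc]; exact List.perm_append_singleton _ _)
          (by
            intro z hz
            rcases List.mem_append.1 hz with h | h
            · exact hq0S z (by simp [h])
            · exact hq0Q1 z h)
          (by
            intro z hz
            rcases List.mem_append.1 hz with h | h
            · exact hs0S1 z h
            · exact hs0Q1 z h)
        rw [hkey]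
        ring
      · -- case QQ: both pops from the sums queue
        push_neg at h2
        obtain ⟨hjlt2, h2b⟩ := h2
        rcases hQ1d : Q1 with _ | ⟨q1, Q2⟩
        · exfalso; rw [hQ1d] at hlenQ; simp at hlenQ; omega
        rw [hQ1d] at hQpw hSQ hQ2 hq0Q1
        have hq1v : sums.getD (j + 1) 0 = q1 := by
          have hdd : (sums.drop j).drop 1 = sums.drop (j + 1) := List.drop_drop
          rw [hQd, hQ1d] at hdd
          have h' := getD_drop sums (j + 1) 0
          rw [← hdd] at h'
          simpa using h'.symm
        have ht2 : take2 A sums i (j + 1) = (sums.getD (j + 1) 0, i, j + 1 + 1) := by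
          rw [take2, if_neg]
          push_neg
          exact ⟨by omega, h2b⟩
        have hq01 : q0 ≤ q1 := hq0Q1 q1 (by simp)
        have hq1Q2 : ∀ q ∈ Q2, q1 ≤ q :=
          (List.pairwise_cons.1 (List.pairwise_cons.1 hQpw).2).1
        have hq0Q2 : ∀ q ∈ Q2, q0 ≤ q := fun q hq => hq0Q1 q (by simp [hq])
        have hq1S : ∀ z ∈ A.drop i, q1 ≤ z := by
          intro z hz
          rcases Nat.lt_or_ge i A.length with hlt | hge
          · rcases hSd : A.drop i with _ | ⟨s0, S1⟩
            · rw [hSd] at hz; simp at hz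
            · have hx0 : A.getD i 0 = s0 := by
                have h := getD_drop A i 0; rw [hSd] at h; simpa using h.symm
              have hlt2 := h2b hlt
              rw [hx0, hq1v] at hlt2
              rw [hSd] at hz
              have hSpw' := hSpw
              rw [hSd] at hSpw'
              rcases List.mem_cons.1 hz with hh | hh
              · omega
              · have := (List.pairwise_cons.1 hSpw').1 z hh
                omega
          · rw [List.drop_of_length_le hge] at hz; simp at hz
        have hkQ2 : ∀ q ∈ Q2, q ≤ q0 + q1 := by
          intro q hq
          have ha := (List.pairwise_cons.1 hQ2).1 q (by simp [hq])
          have hb := (List.pairwise_cons.1 (List.pairwise_cons.1 hQ2).2).1 q hq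
          omega
        have hQ2K : (sums ++ [q0 + q1]).drop (j + 2) = Q2 ++ [q0 + q1] := by
          rw [drop_append_right sums (q0 + q1) (j + 2) (by omega)]
          have h : (sums.drop j).drop 2 = sums.drop (j + 2) := List.drop_drop
          rw [hQd, hQ1d] at h; simp at h
          rw [← h]
        have hInv' : InvB (A.drop i) ((sums ++ [q0 + q1]).drop (j + 2)) := by
          rw [hQ2K]
          refine ⟨hSpw, ?_, ?_, ?_⟩
          · rw [List.pairwise_append]
            refine ⟨(List.pairwise_cons.1 (List.pairwise_cons.1 hQpw).2).2, by simp, ?_⟩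
            intro a ha b hb
            rcases List.mem_singleton.1 hb with rfl
            exact hkQ2 a ha
          · intro s hs q hq
            rcases List.mem_append.1 hq with hh | hh
            · exact hSQ s hs q (by simp [hh])
            · rcases List.mem_singleton.1 hh with rfl
              have h1' := hq0S s hs
              have h2' := hq1S s hs
              omega
          · rw [List.pairwise_append]
            refine ⟨(List.pairwise_cons.1 (List.pairwise_cons.1 hQ2).2).2, by simp, ?_⟩
            intro a ha b hb
            rcases List.mem_singleton.1 hb with rfl
            have h1' := hq0Q2 a ha
            have h2' := hq1Q2 a ha
            omega
        have hrec := ih A (sums ++ [q0 + q1]) i (j + 2) (r + (q0 + q1)) (by omega)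
          (by simp; omega) (by simp; omega) hInv'
        rw [hQ2K] at hrec
        simp only [ht1]
        simp only [ht2]
        rw [hq0, hq1v, show j + 1 + 1 = j + 2 from rfl, hrec]
        have hkey := grec_key q0 q1 (A.drop i ++ Q2) (A.drop i ++ (q0 :: q1 :: Q2))
          (A.drop i ++ (Q2 ++ [q0 + q1]))
          (by
            refine List.perm_middle.trans ?_
            exact List.Perm.cons q0 List.perm_middle)
          (by rw [← List.append_assoc]; exact List.perm_append_singleton _ _)
          (by
            intro z hz
            rcases List.mem_append.1 hz with h | h
            · exact hq0S z h
            · exact hq0Q2 z h)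
          (by
            intro z hz
            rcases List.mem_append.1 hz with h | h
            · exact hq1S z h
            · exact hq1Q2 z h)
        rw [hkey]
        ring


-- ===== VERDICT (by name: the statement is the Claim_ definition above) =====
theorem f_spec : Claim_equal_f := by
  intro A _
  unfold Spec_f f f_alt
  show fLoop (PySem.List.sorted A (fun x => x) false) 0 0
      (PySem.List.sorted A (fun x => x) false).length =
    bLoop (PySem.List.sorted A (fun x => x) false) [] 0 0 0
      ((PySem.List.sorted A (fun x => x) false).length - 1)
  have hspw : (PySem.List.sorted A (fun x => x) false).Pairwise (· ≤ ·) := by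
    simpa using PySem.List.sorted_pairwise A (fun x : Int => x)
  set s := PySem.List.sorted A (fun x => x) false with hs
  have hIA : IA (s.drop 0) := by
    rw [List.drop_zero]
    rcases hsd : s with _ | ⟨a, t1⟩
    · simp [IA]
    rcases t1 with _ | ⟨b, t⟩
    · simp [IA]
    rw [hsd] at hspw
    simp only [IA]
    refine ⟨(List.pairwise_cons.1 (List.pairwise_cons.1 hspw).2).2, ?_, ?_⟩
    · intro z hz
      exact (List.pairwise_cons.1 hspw).1 z (by simp [hz])
    · exact (List.pairwise_cons.1 (List.pairwise_cons.1 hspw).2).1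
  have hL := fLoop_eq s.length s 0 0 (by omega) (by omega) hIA
  rcases Nat.eq_zero_or_pos s.length with h0 | hpos
  · have hnil : s = [] := List.length_eq_zero_iff.1 h0
    rw [hnil]
    rfl
  · have hInv0 : InvB (s.drop 0) (([] : List Int).drop 0) := by
      refine ⟨by rw [List.drop_zero]; exact hspw, by simp, by simp, by simp⟩
    have hR := bLoop_eq (s.length - 1) s [] 0 0 0 (by omega) (by simp) (by simp; omega) hInv0
    rw [hL, hR]
    simp
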